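-- pv_equiv track=rewrite | github.com/younhwan97/algorithm-practice | python/Samsung/boj-17140.py | c_function
-- ===== SOURCE A (Python) =====
-- import sys, heapq
--
-- def c_function(graph, r, c):
--     check = [[0] * 101 for _ in range(c)]
--
--     for i in range(r):
--         for j in range(c):
--             value = graph[i][j]
--             check[j][value] += 1
--
--     max_col_cnt = -1
--
--     for i in range(c):
--         cnt = 0
--         for j in range(1, 101):
--             if check[i][j] != 0:
--                 cnt += 1
--         max_col_cnt = max(max_col_cnt, cnt)
--
--     max_col_cnt *= 2
--
--     new_graph = [[0] * c for _ in range(max_col_cnt)]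
--
--     for i in range(c):
--         pq = []
--         for j in range(1, 101):
--             if check[i][j] != 0:
--                 heapq.heappush(pq, (check[i][j], j))
--
--         idx = 0
--         while pq:
--             cnt, value = heapq.heappop(pq)
--             new_graph[idx][i] = value
--             idx += 1
--             new_graph[idx][i] = cnt
--             idx += 1
--
--     return new_graph
-- ===== SOURCE B (Python) =====
-- def c_function(graph, r, c):
--     # counting-sort re-implementation: no heap and no comparison sort anywhere
--     freq = [{} for _ in range(c)]
--     for i in range(r):
--         for j in range(c):
--             v = graph[i][j]
--             if 1 <= v <= 100:
--                 freq[j][v] = freq[j].get(v, 0) + 1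
--     cols = []
--     height = 0
--     for f in freq:
--         buckets = {}
--         for v in range(1, 101):
--             if v in f:
--                 buckets.setdefault(f[v], []).append(v)
--         stream = []
--         for cnt in range(1, r + 1):
--             for v in buckets.get(cnt, ()):
--                 stream.append(v)
--                 stream.append(cnt)
--         cols.append(stream)
--         height = max(height, len(stream))
--     return [[col[k] if k < len(col) else 0 for col in cols] for k in range(height)]
-- ===== Notes on version B (the rewrite author's own statement) =====
-- stated objective: alternative
-- what changed: Replaces A's per-column heap (comparison ordering) with a counting sort: distinct values are grouped into buckets keyed by their frequency and emitted by enumerating frequencies 1..r ascending, frequency dicts are built row-major in one pass over the grid instead of A's c-by-101 bucket table with per-column 1..100 rescans, and the output is assembled by transposing per-column streams instead of in-place writes into a preallocated grid.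
-- outside the precondition, e.g. on c_function([[-5]], 1, 1): A returns [[96], [1]], B returns []
import Mathlib
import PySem

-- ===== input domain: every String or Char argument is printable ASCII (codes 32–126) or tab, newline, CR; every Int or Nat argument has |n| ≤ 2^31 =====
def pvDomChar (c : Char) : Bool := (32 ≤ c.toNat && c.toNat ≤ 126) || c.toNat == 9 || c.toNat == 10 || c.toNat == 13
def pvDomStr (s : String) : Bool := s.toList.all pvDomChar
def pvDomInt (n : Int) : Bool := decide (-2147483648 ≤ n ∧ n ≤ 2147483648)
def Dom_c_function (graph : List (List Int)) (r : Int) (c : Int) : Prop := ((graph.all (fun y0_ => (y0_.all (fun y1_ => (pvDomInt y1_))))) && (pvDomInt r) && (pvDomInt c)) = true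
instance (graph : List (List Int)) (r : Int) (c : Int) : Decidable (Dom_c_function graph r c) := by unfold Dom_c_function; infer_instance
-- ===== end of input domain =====

-- B re-implements A without any heap or comparison sort: it builds per-column frequency dicts in
-- one row-major pass, counting-sorts each column's distinct values into buckets keyed by their
-- frequency (emitting by enumerating frequencies 1..r ascending), and assembles the output by
-- transposing the per-column streams; same asymptotic cost.

-- ===== PORT A =====
-- Python tuple comparison '<' used by heapq on (cnt, value) pairs (lexicographic)
def pvLexLt (a b : Int × Int) : Bool :=
  decide (a.1 < b.1) || (!decide (b.1 < a.1) && decide (a.2 < b.2))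

-- 'while pq: cnt, value = heapq.heappop(pq); new_graph[idx][i] = value; idx += 1; new_graph[idx][i] = cnt; idx += 1'
-- (pq is kept as an ascending-sorted list, see the comment at its build site; heappop = take the head)
def pvDrain (g : List (List Int)) (i : Int) (pq : List (Int × Int)) (idx : Int) : List (List Int) :=
  match pq with
  | [] => g
  | (cnt, value) :: rest =>
    let g1 := PySem.List.pySetD g idx (PySem.List.pySetD (PySem.List.pyGetD g idx []) i value)
    let g2 := PySem.List.pySetD g1 (idx + 1) (PySem.List.pySetD (PySem.List.pyGetD g1 (idx + 1) []) i cnt)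
    pvDrain g2 i rest (idx + 1 + 1)

-- 'check = [[0] * 101 for _ in range(c)]; for i in range(r): for j in range(c): value = graph[i][j]; check[j][value] += 1'
def pvCheck (graph : List (List Int)) (r c : Int) : List (List Int) :=
  (PySem.List.pyRange 0 r).foldl (fun ch i =>
    (PySem.List.pyRange 0 c).foldl (fun ch j =>
      let value := PySem.List.pyGetD (PySem.List.pyGetD graph i []) j 0
      PySem.List.pySetD ch j
        (PySem.List.pySetD (PySem.List.pyGetD ch j []) value
          (PySem.List.pyGetD (PySem.List.pyGetD ch j []) value 0 + 1))) ch)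
    ((PySem.List.pyRange 0 c).map (fun _ => PySem.List.pyRepeat [(0 : Int)] 101))

-- 'cnt = 0; for j in range(1, 101): if check[i][j] != 0: cnt += 1'
def pvCntCol (check : List (List Int)) (i : Int) : Int :=
  (PySem.List.pyRange 1 101).foldl (fun cnt j =>
    if PySem.List.pyGetD (PySem.List.pyGetD check i []) j 0 ≠ 0 then cnt + 1 else cnt) 0

-- 'pq = []; for j in range(1, 101): if check[i][j] != 0: heapq.heappush(pq, (check[i][j], j))'
-- since pq is only built by pushes and then popped until empty, heappush is modeled exactly as an
-- ascending ordered insert under Python's tuple '<' (a heap pops its items in ascending order)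
def pvPQ (check : List (List Int)) (i : Int) : List (Int × Int) :=
  (PySem.List.pyRange 1 101).foldl (fun pq j =>
    if PySem.List.pyGetD (PySem.List.pyGetD check i []) j 0 ≠ 0 then
      PySem.List.insertBy pvLexLt (PySem.List.pyGetD (PySem.List.pyGetD check i []) j 0, j) pq
    else pq) []

def c_function (graph : List (List Int)) (r : Int) (c : Int) : List (List Int) :=
  let check := pvCheck graph r c
  let maxColCnt := (PySem.List.pyRange 0 c).foldl (fun m i => max m (pvCntCol check i)) (-1 : Int)
  let m2 := maxColCnt * 2
  -- new_graph = [[0] * c for _ in range(max_col_cnt)]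
  let newGraph0 : List (List Int) := (PySem.List.pyRange 0 m2).map (fun _ => PySem.List.pyRepeat [(0 : Int)] c)
  (PySem.List.pyRange 0 c).foldl (fun g i => pvDrain g i (pvPQ check i) 0) newGraph0

-- ===== PORT B =====
-- 'freq = [{} for _ in range(c)]; for i in range(r): for j in range(c):
--    v = graph[i][j]; if 1 <= v <= 100: freq[j][v] = freq[j].get(v, 0) + 1'
def pvFreqB (graph : List (List Int)) (r c : Int) : List (PySem.Dict Int Int) :=
  (PySem.List.pyRange 0 r).foldl (fun fr i =>
    (PySem.List.pyRange 0 c).foldl (fun fr j =>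
      let v := PySem.List.pyGetD (PySem.List.pyGetD graph i []) j 0
      if 1 ≤ v ∧ v ≤ 100 then
        PySem.List.pySetD fr j
          ((PySem.List.pyGetD fr j PySem.Dict.empty).insert v
            ((PySem.List.pyGetD fr j PySem.Dict.empty).getD v 0 + 1))
      else fr) fr)
    ((PySem.List.pyRange 0 c).map (fun _ => PySem.Dict.empty))

-- per-column body: 'buckets = {}; for v in range(1, 101): if v in f: buckets.setdefault(f[v], []).append(v)'
-- ('setdefault(k, []).append(v)' mutates the bucket list in place = Dict.modify with default [])
-- then 'stream = []; for cnt in range(1, r + 1): for v in buckets.get(cnt, ()): stream.append(v); stream.append(cnt)'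
def pvStreamB (r : Int) (f : PySem.Dict Int Int) : List Int :=
  let buckets := (PySem.List.pyRange 1 101).foldl (fun b v =>
    if f.contains v then b.modify (f.getD v 0) [] (fun l => l ++ [v]) else b)
    (PySem.Dict.empty : PySem.Dict Int (List Int))
  (PySem.List.pyRange 1 (r + 1)).foldl (fun s cnt =>
    (buckets.getD cnt []).foldl (fun s v => s ++ [v] ++ [cnt]) s) []

def c_function_alt (graph : List (List Int)) (r : Int) (c : Int) : List (List Int) :=
  let freq := pvFreqB graph r c
  -- 'cols = []; height = 0; for f in freq: … cols.append(stream); height = max(height, len(stream))'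
  let cs := freq.foldl (fun (s : List (List Int) × Int) f =>
    (s.1 ++ [pvStreamB r f], max s.2 (PySem.List.len (pvStreamB r f)))) ([], 0)
  -- '[[col[k] if k < len(col) else 0 for col in cols] for k in range(height)]'
  (PySem.List.pyRange 0 cs.2).map (fun k =>
    cs.1.map (fun col => if k < PySem.List.len col then PySem.List.pyGetD col k 0 else 0))

-- ===== PRECONDITION & SPEC =====
-- Pre_ restricts cell values of the scanned r×c region to the BOJ-17140 problem's natural 0..100
-- domain: outside it A either raises IndexError (v > 100 or v < -101, or a missing row/column) or,
-- for -101 ≤ v ≤ -1, silently counts the cell via Python's negative-index wraparound into bucket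
-- 101+v, which B does not reproduce (it ignores such cells like it ignores 0).
def Pre_c_function (graph : List (List Int)) (r : Int) (c : Int) : Prop :=
  c ≤ 0 ∨ (r ≤ (graph.length : Int) ∧
    ∀ row ∈ graph.take r.toNat, c ≤ (row.length : Int) ∧ ∀ v ∈ row.take c.toNat, 0 ≤ v ∧ v ≤ 100)
instance (graph : List (List Int)) (r : Int) (c : Int) : Decidable (Pre_c_function graph r c) := by
  unfold Pre_c_function; infer_instance

def pvWitness_c_function : List (List Int) × Int × Int := ([[1, 2], [3, 2]], 2, 2)

def Spec_c_function (graph : List (List Int)) (r : Int) (c : Int) (out : List (List Int)) : Prop := out = c_function_alt graph r c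
instance (graph : List (List Int)) (r : Int) (c : Int) (out : List (List Int)) : Decidable (Spec_c_function graph r c out) := by unfold Spec_c_function; infer_instance

-- ===== CLAIM (what is proved, stated in full; the proofs are below) =====
def Claim_equal_c_function : Prop := ∀ (graph : List (List Int)) (r : Int) (c : Int), Dom_c_function graph r c → Pre_c_function graph r c → Spec_c_function graph r c (c_function graph r c)

-- ===== LEMMAS AND PROOFS =====

-- common abstract description of the result, used to meet the two ports in the middle
def pvVal (graph : List (List Int)) (i j : Int) : Int :=
  PySem.List.pyGetD (PySem.List.pyGetD graph i []) j 0

def pvCol (graph : List (List Int)) (r j : Int) : List Int :=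
  (PySem.List.pyRange 0 r).map (fun i => pvVal graph i j)

def pvFCol (graph : List (List Int)) (r j : Int) : List Int :=
  (pvCol graph r j).filter (fun v => decide (1 ≤ v ∧ v ≤ 100))

def pvListA (graph : List (List Int)) (r j : Int) : List Int :=
  (PySem.List.pyRange 1 101).filter (fun v => decide ((pvCol graph r j).count v ≠ 0))

def pvPairs (graph : List (List Int)) (r j : Int) : List (Int × Int) :=
  PySem.List.sorted2
    ((PySem.Set.ofList (pvFCol graph r j)).map (fun v => (((pvFCol graph r j).count v : Int), v)))
    Prod.fst Prod.snd

def pvStream (graph : List (List Int)) (r j : Int) : List Int :=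
  (pvPairs graph r j).flatMap (fun p => [p.2, p.1])

def pvLS (graph : List (List Int)) (r j : Int) : Int := PySem.List.len (pvStream graph r j)

def pvLens (graph : List (List Int)) (r c : Int) : List Int :=
  (PySem.List.pyRange 0 c).map (fun j => pvLS graph r j)

def pvHB (graph : List (List Int)) (r c : Int) : Int :=
  (pvLens graph r c).foldl max 0

def pvGridOf (graph : List (List Int)) (r c H : Int) : List (List Int) :=
  (PySem.List.pyRange 0 H).map (fun k =>
    (PySem.List.pyRange 0 c).map (fun j =>
      if k < pvLS graph r j then PySem.List.pyGetD (pvStream graph r j) k 0 else 0))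

-- ---- generic sorted2 facts ----
lemma pvKeyLt (a b : Int × Int) :
    pvLexLt a b = decide ((toLex a : Lex (Int × Int)) < toLex b) := by
  unfold pvLexLt
  by_cases h1 : a.1 < b.1 <;> by_cases h2 : b.1 < a.1 <;> by_cases h3 : a.2 < b.2 <;>
    simp [Prod.Lex.lt_iff, h1, h2, h3] <;> omega

lemma pairwise_foldl_insertBy {α κ : Type} [LinearOrder κ] (key : α → κ) (xs : List α) :
    ∀ acc : List α, acc.Pairwise (fun a b => key a ≤ key b) →
      (xs.foldl (fun acc x => PySem.List.insertBy (fun a b => decide (key a < key b)) x acc) acc).Pairwise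
        (fun a b => key a ≤ key b) := by
  induction xs with
  | nil => intro acc h; simpa using h
  | cons x xs ih =>
    intro acc h
    exact ih _ (PySem.List.insertBy_pairwise_le key x acc h)

lemma sorted2_foldl_pvLexLt (xs : List (Int × Int)) :
    PySem.List.sorted2 xs Prod.fst Prod.snd =
      xs.foldl (fun acc x => PySem.List.insertBy pvLexLt x acc) [] := rfl

lemma sorted2_eq_foldl (xs : List (Int × Int)) :
    PySem.List.sorted2 xs Prod.fst Prod.snd =
      xs.foldl (fun acc x =>
        PySem.List.insertBy (fun a b => decide ((toLex a : Lex (Int × Int)) < toLex b)) x acc) [] := by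
  rw [sorted2_foldl_pvLexLt]
  congr 1
  funext acc x
  congr 1
  funext a b
  exact pvKeyLt a b

lemma sorted2_pairwise_le (zs : List (Int × Int)) :
    (PySem.List.sorted2 zs Prod.fst Prod.snd).Pairwise
      (fun a b => (toLex a : Lex (Int × Int)) ≤ toLex b) := by
  rw [sorted2_eq_foldl]
  exact pairwise_foldl_insertBy (fun p => (toLex p : Lex (Int × Int))) zs [] (by simp)

lemma sorted2_eq_of_pairwise_perm {L zs : List (Int × Int)} (hperm : L.Perm zs)
    (hp : L.Pairwise (fun a b => (toLex a : Lex (Int × Int)) ≤ toLex b)) :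
    PySem.List.sorted2 zs Prod.fst Prod.snd = L := by
  refine List.Perm.eq_of_pairwise ?_ (sorted2_pairwise_le zs) hp
    ((PySem.List.sorted2_perm zs Prod.fst Prod.snd _).trans hperm.symm)
  intro a b _ _ hab hba
  have : (toLex a : Lex (Int × Int)) = toLex b := le_antisymm hab hba
  exact toLex_inj.mp this

lemma sorted2_eq_of_perm {xs ys : List (Int × Int)} (h : xs.Perm ys) :
    PySem.List.sorted2 xs Prod.fst Prod.snd = PySem.List.sorted2 ys Prod.fst Prod.snd :=
  sorted2_eq_of_pairwise_perm ((PySem.List.sorted2_perm ys Prod.fst Prod.snd _).trans h.symm)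
    (sorted2_pairwise_le ys)

-- ---- small helpers ----
lemma pyRange_toNat (n : Int) :
    PySem.List.pyRange 0 n = PySem.List.pyRange 0 (n.toNat : Int) := by
  by_cases h : 0 ≤ n
  · rw [Int.toNat_of_nonneg h]
  · have h0 : n.toNat = 0 := Int.toNat_of_nonpos (by omega)
    rw [h0, PySem.List.pyRange_one_eq_nil (by omega)]
    rfl

lemma stream_two_len (l : List (Int × Int)) :
    (l.flatMap (fun p => [p.2, p.1])).length = 2 * l.length := by
  induction l with
  | nil => simp
  | cons x xs ih => simp [ih]; omega

lemma listA_perm (graph : List (List Int)) (r j : Int) :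
    (pvListA graph r j).Perm (PySem.Set.ofList (pvFCol graph r j)) := by
  apply (List.perm_ext_iff_of_nodup ((PySem.List.nodup_pyRange_one 1 101).filter _)
    (PySem.Set.nodup_ofList _)).mpr
  intro v
  rw [PySem.Set.mem_ofList]
  simp only [pvFCol, List.mem_filter, PySem.List.mem_pyRange_one, decide_eq_true_eq]
  constructor
  · rintro ⟨⟨h1, h2⟩, h3⟩
    exact ⟨List.count_pos_iff.mp (Nat.pos_of_ne_zero h3), h1, by omega⟩
  · rintro ⟨hv, h1, h2⟩
    exact ⟨⟨h1, by omega⟩, (List.count_pos_iff.mpr hv).ne'⟩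

lemma pairs_len (graph : List (List Int)) (r j : Int) :
    (pvPairs graph r j).length = (pvListA graph r j).length := by
  unfold pvPairs
  rw [(PySem.List.sorted2_perm _ _ _ _).length_eq, List.length_map,
    ← (listA_perm graph r j).length_eq]

lemma pvLS_eq (graph : List (List Int)) (r j : Int) :
    pvLS graph r j = 2 * ((pvListA graph r j).length : Int) := by
  unfold pvLS pvStream
  rw [PySem.List.len_eq, stream_two_len, pairs_len]
  push_cast
  ring

lemma pvLS_nonneg (graph : List (List Int)) (r j : Int) : 0 ≤ pvLS graph r j := by
  rw [pvLS_eq]; positivity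

lemma two_mul_foldl_max (ns : List Int) :
    ∀ a : Int, 2 * ns.foldl max a = (ns.map (fun x => 2 * x)).foldl max (2 * a) := by
  induction ns with
  | nil => intro a; simp
  | cons x t ih =>
    intro a
    simp only [List.foldl_cons, List.map_cons]
    rw [ih (max a x), mul_max_of_nonneg a x (by norm_num : (0:Int) ≤ 2)]

-- ---- a Python 'xs[i] = xs[i]' is the identity (any i: in range, negative wrap, or out of range) ----
lemma pySetD_pyGetD_self {α : Type} (t : List α) (j : Int) (d : α) :
    PySem.List.pySetD t j (PySem.List.pyGetD t j d) = t := by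
  simp only [PySem.List.pySetD, PySem.List.pySet?, PySem.List.pyGetD, PySem.List.pyGet?,
    PySem.List.pyIdx?]
  split_ifs with h1 h2 h3
  · have hk : j.toNat < t.length := by omega
    simp [List.getElem?_eq_getElem hk, List.set_getElem_self]
  · simp
  · have hk : t.length - (-j).toNat < t.length := by omega
    simp [List.getElem?_eq_getElem hk, List.set_getElem_self]
  · simp

lemma getD_set' {α : Type} (G : List α) (n : Nat) (x d : α) (a : Nat) :
    (G.set n x).getD a d = if n = a ∧ n < G.length then x else G.getD a d := by
  rw [List.getD_eq_getElem?_getD, List.getElem?_set]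
  by_cases h1 : n = a
  · subst h1
    by_cases h2 : n < G.length
    · simp [h2]
    · rw [if_pos rfl, if_neg h2, if_neg (by tauto)]
      rw [List.getD_eq_getElem?_getD, List.getElem?_eq_none (by omega)]
  · rw [if_neg h1, if_neg (by tauto), ← List.getD_eq_getElem?_getD]

-- a loop 'for j in range(n): s[j] = f(j, s[j])' updates each position once
lemma foldl_setD_each {α : Type} (step : List α → Int → List α) (f : Int → α → α) (dflt : α)
    (hstep : ∀ t j, step t j = PySem.List.pySetD t j (f j (PySem.List.pyGetD t j dflt)))
    (n : Nat) :
    ∀ s : List α, n ≤ s.length →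
      ((PySem.List.pyRange 0 (n : Int)).foldl step s).length = s.length ∧
      ∀ k, k < s.length →
        ((PySem.List.pyRange 0 (n : Int)).foldl step s).getD k dflt =
          if k < n then f (k : Int) (s.getD k dflt) else s.getD k dflt := by
  induction n with
  | zero =>
    intro s _
    rw [show ((0 : Nat) : Int) = 0 from rfl, PySem.List.pyRange_one_eq_nil le_rfl]
    simp
  | succ n ih =>
    intro s hn
    obtain ⟨ihl, ihg⟩ := ih s (by omega)
    have hsplit : PySem.List.pyRange 0 ((n + 1 : Nat) : Int) =
        PySem.List.pyRange 0 (n : Int) ++ [(n : Int)] := by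
      push_cast
      exact PySem.List.pyRange_one_succ_right (by positivity)
    rw [hsplit, List.foldl_append, List.foldl_cons, List.foldl_nil, hstep]
    have hprevlen : ((PySem.List.pyRange 0 (n : Int)).foldl step s).length = s.length := ihl
    have hget : PySem.List.pyGetD ((PySem.List.pyRange 0 (n : Int)).foldl step s) (n : Int) dflt
        = s.getD n dflt := by
      rw [PySem.List.pyGetD_natCast, ihg n (by omega)]
      simp
    rw [PySem.List.pySetD_natCast, hget]
    constructor
    · rw [List.length_set, hprevlen]
    · intro k hk
      rw [List.getD_eq_getElem?_getD, List.getElem?_set]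
      by_cases hkn : n = k
      · subst hkn
        simp only [hprevlen, hk, if_pos]
        simp
      · rw [if_neg hkn, ← List.getD_eq_getElem?_getD, ihg k hk]
        by_cases h1 : k < n
        · rw [if_pos h1, if_pos (by omega)]
        · rw [if_neg h1, if_neg (by omega)]

lemma check_spec (graph : List (List Int)) (r c : Int)
    (hval : ∀ i j : Int, 0 ≤ i → i < r → 0 ≤ j → j < c →
      0 ≤ pvVal graph i j ∧ pvVal graph i j ≤ 100) :
    (pvCheck graph r c).length = c.toNat ∧
    ∀ k, k < c.toNat →
      ((pvCheck graph r c).getD k []).length = 101 ∧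
      ∀ t, t < 101 →
        ((pvCheck graph r c).getD k []).getD t 0 = ((pvCol graph r (k : Int)).count (t : Int) : Int) := by
  have hcol : ∀ k : Int, pvCol graph r k =
      (PySem.List.pyRange 0 (r.toNat : Int)).map (fun i => pvVal graph i k) := by
    intro k; rw [pvCol, pyRange_toNat r]
  unfold pvCheck
  rw [pyRange_toNat r, pyRange_toNat c]
  simp only [hcol]
  have hvR : ∀ i : Int, 0 ≤ i → i < (r.toNat : Int) → i < r := by intro i h1 h2; omega
  have hvC : ∀ j : Int, 0 ≤ j → j < ((c.toNat : Nat) : Int) → j < c := by intro j h1 h2; omega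
  generalize hR : r.toNat = R at hvR ⊢
  clear hR hcol
  induction R with
  | zero =>
    rw [show ((0 : Nat) : Int) = 0 from rfl, PySem.List.pyRange_one_eq_nil le_rfl]
    simp only [List.foldl_nil, List.map_nil, List.map_const', PySem.List.pyRepeat_singleton,
      PySem.List.length_pyRange_one]
    refine ⟨by simp; omega, ?_⟩
    intro k hk
    have hk' : k < (((c.toNat : Nat) : Int) - 0).toNat := by omega
    rw [List.getD_eq_getElem?_getD, List.getElem?_replicate, if_pos hk']
    simp only [Option.getD_some]
    refine ⟨by simp, ?_⟩
    intro t ht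
    rw [List.getD_eq_getElem?_getD, List.getElem?_replicate,
      if_pos (show t < (101 : Int).toNat by omega)]
    simp
  | succ R ih =>
    have hvR' : ∀ i : Int, 0 ≤ i → i < (R : Int) → i < r := by
      intro i h1 h2; exact hvR i h1 (by push_cast; omega)
    obtain ⟨ihl, ihg⟩ := ih hvR'
    have hsplit : PySem.List.pyRange 0 ((R + 1 : Nat) : Int) =
        PySem.List.pyRange 0 (R : Int) ++ [(R : Int)] := by
      push_cast
      exact PySem.List.pyRange_one_succ_right (by positivity)
    rw [hsplit]
    simp only [List.foldl_append, List.foldl_cons, List.foldl_nil, List.map_append,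
      List.map_cons, List.map_nil, List.count_append]
    have hv : ∀ j : Int, 0 ≤ j → j < ((c.toNat : Nat) : Int) →
        0 ≤ pvVal graph (R : Int) j ∧ pvVal graph (R : Int) j ≤ 100 := by
      intro j h1 h2
      exact hval _ j (by positivity) (hvR _ (by positivity) (by push_cast; omega)) h1 (hvC j h1 h2)
    have hstep := foldl_setD_each
      (step := fun ch j =>
        PySem.List.pySetD ch j
          (PySem.List.pySetD (PySem.List.pyGetD ch j [])
            (PySem.List.pyGetD (PySem.List.pyGetD graph (R : Int) []) j 0)
            (PySem.List.pyGetD (PySem.List.pyGetD ch j [])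
              (PySem.List.pyGetD (PySem.List.pyGetD graph (R : Int) []) j 0) 0 + 1)))
      (f := fun j row =>
        PySem.List.pySetD row (pvVal graph (R : Int) j)
          (PySem.List.pyGetD row (pvVal graph (R : Int) j) 0 + 1))
      (dflt := []) (fun t j => rfl) c.toNat _ (le_of_eq ihl.symm)
    obtain ⟨hl2, hg2⟩ := hstep
    refine ⟨hl2.trans ihl, ?_⟩
    intro k hk
    rw [hg2 k (by rw [ihl]; exact hk), if_pos hk]
    beta_reduce
    obtain ⟨hrl, hrg⟩ := ihg k hk
    have hvk := hv (k : Int) (by positivity) (by omega)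
    have hvlt : (pvVal graph (R : Int) (k : Int)).toNat < 101 := by omega
    rw [show pvVal graph (R : Int) (k : Int)
        = (((pvVal graph (R : Int) (k : Int)).toNat : Nat) : Int) from by omega,
      PySem.List.pySetD_natCast, PySem.List.pyGetD_natCast]
    refine ⟨by rw [List.length_set, hrl], ?_⟩
    intro t ht
    rw [getD_set']
    by_cases hvt : (pvVal graph (R : Int) (k : Int)).toNat = t
    · subst hvt
      rw [if_pos ⟨rfl, by rw [hrl]; exact hvlt⟩, hrg _ hvlt]
      simp
    · rw [if_neg (by tauto), hrg t ht, List.count_cons, List.count_nil]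
      simp only [beq_iff_eq]
      rw [if_neg (by omega)]
      simp

-- ---- A side: per-column count and priority queue ----
lemma bucket_eq (graph : List (List Int)) (r c : Int)
    (hval : ∀ i j : Int, 0 ≤ i → i < r → 0 ≤ j → j < c →
      0 ≤ pvVal graph i j ∧ pvVal graph i j ≤ 100)
    (k : Nat) (hk : k < c.toNat) :
    ∀ x : Int, 1 ≤ x → x < 101 →
      PySem.List.pyGetD (PySem.List.pyGetD (pvCheck graph r c) (k : Int) []) x 0
        = ((pvCol graph r (k : Int)).count x : Int) := by
  obtain ⟨hcl, hcg⟩ := check_spec graph r c hval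
  obtain ⟨hrl, hrg⟩ := hcg k hk
  intro x h1 h2
  rw [PySem.List.pyGetD_natCast]
  have hx : x = ((x.toNat : Nat) : Int) := by omega
  rw [hx, PySem.List.pyGetD_natCast, hrg x.toNat (by omega)]

lemma cnt_eq (graph : List (List Int)) (r c : Int)
    (hval : ∀ i j : Int, 0 ≤ i → i < r → 0 ≤ j → j < c →
      0 ≤ pvVal graph i j ∧ pvVal graph i j ≤ 100)
    (k : Nat) (hk : k < c.toNat) :
    pvCntCol (pvCheck graph r c) (k : Int) = ((pvListA graph r (k : Int)).length : Int) := by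
  unfold pvCntCol
  rw [PySem.List.foldl_ite_add_one, zero_add, List.countP_eq_length_filter]
  have hf : List.filter (fun x => decide
        (PySem.List.pyGetD (PySem.List.pyGetD (pvCheck graph r c) (k : Int) []) x 0 ≠ 0))
        (PySem.List.pyRange 1 101) = pvListA graph r (k : Int) := by
    unfold pvListA
    apply List.filter_congr
    intro x hx
    obtain ⟨h1, h2⟩ := PySem.List.mem_pyRange_one.mp hx
    rw [bucket_eq graph r c hval k hk x h1 h2]
    simp
  rw [hf]

lemma pq_eq (graph : List (List Int)) (r c : Int)
    (hval : ∀ i j : Int, 0 ≤ i → i < r → 0 ≤ j → j < c →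
      0 ≤ pvVal graph i j ∧ pvVal graph i j ≤ 100)
    (k : Nat) (hk : k < c.toNat) :
    pvPQ (pvCheck graph r c) (k : Int) = pvPairs graph r (k : Int) := by
  unfold pvPQ
  rw [PySem.List.foldl_ite_eq_foldl_filter]
  have h1 : (List.filter (fun x => decide
        (PySem.List.pyGetD (PySem.List.pyGetD (pvCheck graph r c) (k : Int) []) x 0 ≠ 0))
        (PySem.List.pyRange 1 101)) = pvListA graph r (k : Int) := by
    unfold pvListA
    apply List.filter_congr
    intro x hx
    obtain ⟨h1, h2⟩ := PySem.List.mem_pyRange_one.mp hx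
    rw [bucket_eq graph r c hval k hk x h1 h2]
    simp
  calc List.foldl (fun pq j => PySem.List.insertBy pvLexLt
        (PySem.List.pyGetD (PySem.List.pyGetD (pvCheck graph r c) (k : Int) []) j 0, j) pq) []
        (List.filter _ (PySem.List.pyRange 1 101))
      = ((List.filter (fun x => decide
            (PySem.List.pyGetD (PySem.List.pyGetD (pvCheck graph r c) (k : Int) []) x 0 ≠ 0))
            (PySem.List.pyRange 1 101)).map (fun j =>
              (PySem.List.pyGetD (PySem.List.pyGetD (pvCheck graph r c) (k : Int) []) j 0, j))).foldl
          (fun pq x => PySem.List.insertBy pvLexLt x pq) [] := (List.foldl_map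
            (f := fun j => (PySem.List.pyGetD (PySem.List.pyGetD (pvCheck graph r c) (k : Int) []) j 0, j))
            (g := fun pq x => PySem.List.insertBy pvLexLt x pq)).symm
    _ = PySem.List.sorted2 ((pvListA graph r (k : Int)).map (fun v =>
          (((pvCol graph r (k : Int)).count v : Int), v))) Prod.fst Prod.snd := by
        rw [← sorted2_foldl_pvLexLt, h1]
        congr 1
        apply List.map_congr_left
        intro x hx
        have hx' := hx
        unfold pvListA at hx'
        obtain ⟨hxr, -⟩ := List.mem_filter.mp hx'
        obtain ⟨ha, hb⟩ := PySem.List.mem_pyRange_one.mp hxr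
        rw [bucket_eq graph r c hval k hk x ha hb]
    _ = pvPairs graph r (k : Int) := by
        unfold pvPairs
        apply sorted2_eq_of_perm
        have hmap : (pvListA graph r (k : Int)).map (fun v =>
            (((pvCol graph r (k : Int)).count v : Int), v))
            = (pvListA graph r (k : Int)).map (fun v =>
              (((pvFCol graph r (k : Int)).count v : Int), v)) := by
          apply List.map_congr_left
          intro x hx
          unfold pvListA at hx
          obtain ⟨hxr, -⟩ := List.mem_filter.mp hx
          obtain ⟨ha, hb⟩ := PySem.List.mem_pyRange_one.mp hxr
          have : (pvFCol graph r (k : Int)).count x = (pvCol graph r (k : Int)).count x := by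
            unfold pvFCol
            exact List.count_filter (by simp; omega)
          rw [this]
        rw [hmap]
        exact (listA_perm graph r (k : Int)).map _

-- ---- A side: the drain loop writes one column ----
lemma drain_spec (pq : List (Int × Int)) :
    ∀ (g : List (List Int)) (b idx : Nat),
      idx + 2 * pq.length ≤ g.length →
      (∀ a, a < g.length → b < (g.getD a []).length) →
      (pvDrain g (b : Int) pq (idx : Int)).length = g.length ∧
      (∀ a, ((pvDrain g (b : Int) pq (idx : Int)).getD a []).length = (g.getD a []).length) ∧
      ∀ a t, ((pvDrain g (b : Int) pq (idx : Int)).getD a []).getD t 0 =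
        if t = b ∧ idx ≤ a ∧ a < idx + 2 * pq.length
        then (pq.flatMap (fun p => [p.2, p.1])).getD (a - idx) 0
        else (g.getD a []).getD t 0 := by
  induction pq with
  | nil =>
    intro g b idx _ _
    refine ⟨rfl, fun a => rfl, ?_⟩
    intro a t
    rw [if_neg (by rintro ⟨-, h1, h2⟩; simp at h2; omega)]
    rfl
  | cons hd rest ih =>
    obtain ⟨cnt, value⟩ := hd
    intro g b idx hlen hrow
    have hL : ((cnt, value) :: rest).length = rest.length + 1 := rfl
    have hidx : idx < g.length := by rw [hL] at hlen; omega
    have hidx1 : idx + 1 < g.length := by rw [hL] at hlen; omega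
    simp only [pvDrain]
    have hc1 : ((idx : Nat) : Int) + 1 = (((idx + 1 : Nat) : Nat) : Int) := by push_cast; ring
    have hc2 : ((idx : Nat) : Int) + 1 + 1 = (((idx + 2 : Nat) : Nat) : Int) := by push_cast; ring
    rw [hc2, hc1]
    simp only [PySem.List.pySetD_natCast, PySem.List.pyGetD_natCast]
    set r1 := (g.getD idx []).set b value with hr1
    have e4 : (g.set idx r1).getD (idx + 1) [] = g.getD (idx + 1) [] := by
      rw [getD_set', if_neg (by omega)]
    rw [e4]
    set r2 := (g.getD (idx + 1) []).set b cnt with hr2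
    set g2 := (g.set idx r1).set (idx + 1) r2 with hg2
    have hg2len : g2.length = g.length := by simp [hg2]
    have hrowlen : ∀ a, (g2.getD a []).length = (g.getD a []).length := by
      intro a
      rw [hg2, getD_set', getD_set']
      by_cases h1 : idx + 1 = a ∧ idx + 1 < (g.set idx r1).length
      · rw [if_pos h1]
        obtain ⟨ha, -⟩ := h1
        rw [hr2, List.length_set, ← ha]
      · rw [if_neg h1]
        by_cases h2 : idx = a ∧ idx < g.length
        · rw [if_pos h2]
          obtain ⟨ha, -⟩ := h2
          rw [hr1, List.length_set, ← ha]
        · rw [if_neg h2]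
    obtain ⟨ihL, ihRL, ihC⟩ := ih g2 b (idx + 2)
      (by simp only [List.length_cons] at hlen; rw [hg2len]; omega)
      (by intro a ha; rw [hrowlen a]; exact hrow a (by omega))
    refine ⟨ihL.trans hg2len, ?_, ?_⟩
    · intro a
      rw [ihRL a, hrowlen a]
    · intro a t
      have hcell2 : (g2.getD a []).getD t 0 =
          if t = b ∧ (a = idx ∨ a = idx + 1)
          then (if a = idx then value else cnt)
          else (g.getD a []).getD t 0 := by
        rw [hg2, getD_set', getD_set']
        have hsl : (g.set idx r1).length = g.length := by simp
        rw [hsl]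
        by_cases h1 : idx + 1 = a
        · rw [if_pos ⟨h1, by omega⟩, hr2, getD_set']
          have hb : b < (g.getD (idx + 1) []).length := hrow (idx + 1) hidx1
          by_cases ht : b = t
          · rw [if_pos ⟨ht, hb⟩,
              if_pos (⟨ht.symm, Or.inr h1.symm⟩ : t = b ∧ (a = idx ∨ a = idx + 1)),
              if_neg (show ¬a = idx by omega)]
          · rw [if_neg (fun hh => ht hh.1), if_neg (fun hh => ht hh.1.symm), h1]
        · rw [if_neg (fun hh => h1 hh.1)]
          by_cases h2 : idx = a
          · rw [if_pos ⟨h2, hidx⟩, hr1, getD_set']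
            have hb : b < (g.getD idx []).length := hrow idx hidx
            by_cases ht : b = t
            · rw [if_pos ⟨ht, hb⟩,
                if_pos (⟨ht.symm, Or.inl h2.symm⟩ : t = b ∧ (a = idx ∨ a = idx + 1)),
                if_pos h2.symm]
            · rw [if_neg (fun hh => ht hh.1), if_neg (fun hh => ht hh.1.symm), h2]
          · rw [if_neg (fun hh => h2 hh.1),
              if_neg (show ¬(t = b ∧ (a = idx ∨ a = idx + 1)) by
                rintro ⟨-, h | h⟩
                · exact h2 h.symm
                · exact h1 h.symm)]
      have hflat : (((cnt, value) :: rest).flatMap (fun p => [p.2, p.1]))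
          = value :: cnt :: rest.flatMap (fun p => [p.2, p.1]) := rfl
      rw [ihC a t, hcell2]
      simp only [List.length_cons, hflat]
      by_cases htb : t = b
      · by_cases ha1 : a = idx
        · rw [if_neg (show ¬(t = b ∧ idx + 2 ≤ a ∧ a < idx + 2 + 2 * rest.length) by omega),
            if_pos (show t = b ∧ (a = idx ∨ a = idx + 1) from ⟨htb, Or.inl ha1⟩),
            if_pos ha1,
            if_pos (show t = b ∧ idx ≤ a ∧ a < idx + 2 * (rest.length + 1) from
              ⟨htb, by omega, by omega⟩),
            show a - idx = 0 from by omega]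
          rfl
        · by_cases ha2 : a = idx + 1
          · rw [if_neg (show ¬(t = b ∧ idx + 2 ≤ a ∧ a < idx + 2 + 2 * rest.length) by omega),
              if_pos (show t = b ∧ (a = idx ∨ a = idx + 1) from ⟨htb, Or.inr ha2⟩),
              if_neg ha1,
              if_pos (show t = b ∧ idx ≤ a ∧ a < idx + 2 * (rest.length + 1) from
                ⟨htb, by omega, by omega⟩),
              show a - idx = 1 from by omega]
            rfl
          · by_cases ha3 : idx + 2 ≤ a ∧ a < idx + 2 + 2 * rest.length
            · rw [if_pos (show t = b ∧ idx + 2 ≤ a ∧ a < idx + 2 + 2 * rest.length from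
                  ⟨htb, ha3.1, ha3.2⟩),
                if_pos (show t = b ∧ idx ≤ a ∧ a < idx + 2 * (rest.length + 1) from
                  ⟨htb, by omega, by omega⟩),
                show a - idx = (a - (idx + 2)) + 2 from by omega]
              simp
            · rw [if_neg (show ¬(t = b ∧ idx + 2 ≤ a ∧ a < idx + 2 + 2 * rest.length) by
                  rintro ⟨-, u1, u2⟩; exact ha3 ⟨u1, u2⟩),
                if_neg (show ¬(t = b ∧ (a = idx ∨ a = idx + 1)) by
                  rintro ⟨-, h | h⟩ <;> omega),
                if_neg (show ¬(t = b ∧ idx ≤ a ∧ a < idx + 2 * (rest.length + 1)) by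
                  rintro ⟨-, u1, u2⟩; omega)]
      · rw [if_neg (fun hh => htb hh.1), if_neg (fun hh => htb hh.1),
          if_neg (fun hh => htb hh.1)]

-- ---- A side: the column fold fills the grid ----
lemma fold_drain_spec (graph : List (List Int)) (r : Int) (H W : Nat) :
    ∀ C : Nat, C ≤ W →
      (∀ k : Nat, k < C → (pvStream graph r (k : Int)).length ≤ H) →
      ((PySem.List.pyRange 0 (C : Int)).foldl
          (fun g j => pvDrain g j (pvPairs graph r j) 0)
          (List.replicate H (List.replicate W (0 : Int)))).length = H ∧
      (∀ a, a < H → (((PySem.List.pyRange 0 (C : Int)).foldl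
          (fun g j => pvDrain g j (pvPairs graph r j) 0)
          (List.replicate H (List.replicate W (0 : Int)))).getD a []).length = W) ∧
      ∀ a t, a < H → t < W →
        (((PySem.List.pyRange 0 (C : Int)).foldl
            (fun g j => pvDrain g j (pvPairs graph r j) 0)
            (List.replicate H (List.replicate W (0 : Int)))).getD a []).getD t 0 =
          if (t : Int) < (C : Int) ∧ a < (pvStream graph r (t : Int)).length
          then (pvStream graph r (t : Int)).getD a 0 else 0 := by
  intro C
  induction C with
  | zero =>
    intro _ _
    rw [show ((0 : Nat) : Int) = 0 from rfl, PySem.List.pyRange_one_eq_nil le_rfl]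
    simp only [List.foldl_nil]
    refine ⟨by simp, ?_, ?_⟩
    · intro a ha
      rw [List.getD_eq_getElem?_getD, List.getElem?_replicate, if_pos ha]
      simp
    · intro a t ha ht
      rw [if_neg (by rintro ⟨h1, -⟩; omega :
        ¬((t : Int) < 0 ∧ a < (pvStream graph r (t : Int)).length))]
      simp [List.getD_eq_getElem?_getD, ha, ht]
  | succ C ih =>
    intro hCW hstr
    obtain ⟨ihL, ihRL, ihC⟩ := ih (by omega) (fun k hk => hstr k (by omega))
    have hsplit : PySem.List.pyRange 0 ((C + 1 : Nat) : Int) =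
        PySem.List.pyRange 0 (C : Int) ++ [(C : Int)] := by
      push_cast
      exact PySem.List.pyRange_one_succ_right (by positivity)
    rw [hsplit, List.foldl_append, List.foldl_cons, List.foldl_nil]
    have hplen : 2 * (pvPairs graph r (C : Int)).length = (pvStream graph r (C : Int)).length := by
      rw [pvStream, stream_two_len]
    have hD := drain_spec (pvPairs graph r (C : Int))
      ((PySem.List.pyRange 0 (C : Int)).foldl
        (fun g j => pvDrain g j (pvPairs graph r j) 0)
        (List.replicate H (List.replicate W (0 : Int)))) C 0
      (by rw [ihL]; have := hstr C (by omega); omega)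
      (by intro a ha; rw [ihRL a (by rwa [ihL] at ha)]; omega)
    simp only [Nat.cast_zero] at hD
    obtain ⟨dL, dRL, dC⟩ := hD
    refine ⟨dL.trans ihL, ?_, ?_⟩
    · intro a ha
      rw [dRL a, ihRL a ha]
    · intro a t ha ht
      rw [dC a t]
      by_cases htC : t = C
      · subst htC
        by_cases haS : a < (pvStream graph r (t : Int)).length
        · rw [if_pos ⟨rfl, by omega, by omega⟩, if_pos ⟨by push_cast; omega, haS⟩]
          simp only [Nat.sub_zero]
          rfl
        · rw [if_neg (by rintro ⟨-, -, u⟩; omega), ihC a t ha ht,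
            if_neg (by rintro ⟨h1, -⟩; omega), if_neg (by rintro ⟨-, h2⟩; omega)]
      · rw [if_neg (by tauto), ihC a t ha ht]
        by_cases hlt : (t : Int) < (C : Int) ∧ a < (pvStream graph r (t : Int)).length
        · rw [if_pos hlt, if_pos ⟨by push_cast at hlt ⊢; omega, hlt.2⟩]
        · rw [if_neg hlt, if_neg ?_]
          rintro ⟨h1, h2⟩
          apply hlt
          refine ⟨?_, h2⟩
          have : t ≠ C := htC
          push_cast at h1 ⊢
          omega

lemma getElem_eq_getD {α : Type} (l : List α) (i : Nat) (d : α) (h : i < l.length) :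
    l[i] = l.getD i d := by
  rw [List.getD_eq_getElem?_getD, List.getElem?_eq_getElem h]
  rfl

lemma a_eq_grid (graph : List (List Int)) (r c : Int) (hpre : Pre_c_function graph r c) :
    c_function graph r c = pvGridOf graph r c (pvHB graph r c) := by
  by_cases hc : c ≤ 0
  · have hcr : PySem.List.pyRange 0 c = [] := PySem.List.pyRange_one_eq_nil hc
    simp only [c_function, hcr, List.foldl_nil]
    rw [PySem.List.pyRange_one_eq_nil (by norm_num : (-1 : Int) * 2 ≤ 0)]
    simp only [List.map_nil]
    unfold pvGridOf pvHB pvLens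
    rw [hcr]
    simp [PySem.List.pyRange_one_eq_nil (le_refl (0 : Int))]
  · obtain ⟨hr, hrows⟩ := hpre.resolve_left hc
    have hc' : 0 < c := by omega
    have hval : ∀ i j : Int, 0 ≤ i → i < r → 0 ≤ j → j < c →
        0 ≤ pvVal graph i j ∧ pvVal graph i j ≤ 100 := by
      intro i j h0i hir h0j hjc
      have hil : i.toNat < graph.length := by omega
      have hig : PySem.List.pyGetD graph i [] = graph[i.toNat] :=
        PySem.List.pyGetD_eq_getElem _ _ h0i (by omega)
      have hmem : graph[i.toNat] ∈ graph.take r.toNat := by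
        have h1 : i.toNat < (graph.take r.toNat).length := by
          simp only [List.length_take]
          omega
        have h2 : (graph.take r.toNat)[i.toNat]'h1 = graph[i.toNat]'hil := by
          simp [List.getElem_take]
        exact h2 ▸ List.getElem_mem h1
      obtain ⟨hcl, hvals⟩ := hrows _ hmem
      have hjl : j.toNat < graph[i.toNat].length := by omega
      have hjg : PySem.List.pyGetD graph[i.toNat] j 0 = graph[i.toNat][j.toNat] :=
        PySem.List.pyGetD_eq_getElem _ _ h0j (by omega)
      have hvmem : graph[i.toNat][j.toNat] ∈ graph[i.toNat].take c.toNat := by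
        have h1 : j.toNat < (graph[i.toNat].take c.toNat).length := by
          simp only [List.length_take]
          omega
        have h2 : (graph[i.toNat].take c.toNat)[j.toNat]'h1 = graph[i.toNat][j.toNat]'hjl := by
          simp [List.getElem_take]
        exact h2 ▸ List.getElem_mem h1
      have hb := hvals _ hvmem
      unfold pvVal
      rw [hig, hjg]
      exact hb
    simp only [c_function]
    have hcongr1 : (PySem.List.pyRange 0 c).foldl
        (fun m i => max m (pvCntCol (pvCheck graph r c) i)) (-1 : Int)
        = (PySem.List.pyRange 0 c).foldl
          (fun m i => max m ((pvListA graph r i).length : Int)) (-1 : Int) := by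
      apply PySem.List.foldl_congr_mem
      intro acc x hx
      obtain ⟨h0x, hxc⟩ := PySem.List.mem_pyRange_one.mp hx
      rw [show x = ((x.toNat : Nat) : Int) from by omega,
        cnt_eq graph r c hval x.toNat (by omega)]
    rw [hcongr1]
    have e1 : (PySem.List.pyRange 0 c).foldl
        (fun m i => max m ((pvListA graph r i).length : Int)) (-1 : Int)
        = ((PySem.List.pyRange 0 c).map (fun i => ((pvListA graph r i).length : Int))).foldl
          max (-1) :=
      (List.foldl_map (f := fun i => ((pvListA graph r i).length : Int))
        (g := fun (m x : Int) => max m x)).symm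
    have hm2 : (PySem.List.pyRange 0 c).foldl
        (fun m i => max m ((pvListA graph r i).length : Int)) (-1 : Int) * 2
        = (pvLens graph r c).foldl max (-2) := by
      rw [mul_comm, e1, two_mul_foldl_max, List.map_map]
      have e2 : ((fun x => 2 * x) ∘ fun i => ((pvListA graph r i).length : Int))
          = fun j => pvLS graph r j := by
        funext j
        simp only [Function.comp]
        exact (pvLS_eq graph r j).symm
      rw [e2]
      norm_num
      rfl
    rw [hm2]
    have hHB : (pvLens graph r c).foldl max (-2) = pvHB graph r c := by
      have hcons : pvLens graph r c
          = pvLS graph r 0 :: (PySem.List.pyRange 1 c).map (fun j => pvLS graph r j) := by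
        unfold pvLens
        rw [PySem.List.pyRange_one_cons hc']
        rfl
      unfold pvHB
      rw [hcons, List.foldl_cons, List.foldl_cons,
        max_eq_right (by have := pvLS_nonneg graph r 0; omega),
        max_eq_right (pvLS_nonneg graph r 0)]
    have hg0 : (PySem.List.pyRange 0 ((pvLens graph r c).foldl max (-2))).map
        (fun _ => PySem.List.pyRepeat [(0 : Int)] c)
        = List.replicate ((pvLens graph r c).foldl max (-2)).toNat
            (List.replicate c.toNat (0 : Int)) := by
      rw [List.map_const', PySem.List.pyRepeat_singleton, PySem.List.length_pyRange_one]
      congr 1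
      omega
    rw [hg0]
    have hcongr2 : (PySem.List.pyRange 0 c).foldl
        (fun g i => pvDrain g i (pvPQ (pvCheck graph r c) i) 0)
        (List.replicate ((pvLens graph r c).foldl max (-2)).toNat
          (List.replicate c.toNat (0 : Int)))
        = (PySem.List.pyRange 0 c).foldl
          (fun g i => pvDrain g i (pvPairs graph r i) 0)
          (List.replicate ((pvLens graph r c).foldl max (-2)).toNat
            (List.replicate c.toNat (0 : Int))) := by
      apply PySem.List.foldl_congr_mem
      intro acc x hx
      obtain ⟨h0x, hxc⟩ := PySem.List.mem_pyRange_one.mp hx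
      rw [show x = ((x.toNat : Nat) : Int) from by omega,
        pq_eq graph r c hval x.toNat (by omega)]
    rw [hcongr2, pyRange_toNat c]
    have hLSle : ∀ k : Nat, k < c.toNat →
        (pvStream graph r (k : Int)).length ≤ ((pvLens graph r c).foldl max (-2)).toNat := by
      intro k hk
      have hmem : pvLS graph r (k : Int) ∈ pvLens graph r c := by
        unfold pvLens
        exact List.mem_map_of_mem (PySem.List.mem_pyRange_one.mpr ⟨by positivity, by omega⟩)
      have hle := (PySem.List.le_foldl_max (pvLens graph r c) (-2)).2 _ hmem
      have hls : pvLS graph r (k : Int) = ((pvStream graph r (k : Int)).length : Int) := by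
        unfold pvLS
        rw [PySem.List.len_eq]
      omega
    obtain ⟨hGL, hGRL, hGC⟩ := fold_drain_spec graph r
      ((pvLens graph r c).foldl max (-2)).toNat c.toNat c.toNat le_rfl hLSle
    apply List.ext_getElem
    · rw [hGL]
      unfold pvGridOf
      rw [List.length_map, PySem.List.length_pyRange_one, ← hHB]
      omega
    · intro a h1 h2
      have ha : a < ((pvLens graph r c).foldl max (-2)).toNat := by rwa [hGL] at h1
      rw [getElem_eq_getD _ a ([] : List Int) h1]
      unfold pvGridOf
      simp only [List.getElem_map, PySem.List.getElem_pyRange_one, zero_add]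
      apply List.ext_getElem
      · rw [hGRL a ha, List.length_map, PySem.List.length_pyRange_one]
        omega
      · intro t ht1 ht2
        have htc : t < c.toNat := by rw [hGRL a ha] at ht1; exact ht1
        rw [getElem_eq_getD _ t (0 : Int) ht1, hGC a t ha htc]
        simp only [List.getElem_map, PySem.List.getElem_pyRange_one, zero_add]
        have hls : pvLS graph r (t : Int) = ((pvStream graph r (t : Int)).length : Int) := by
          unfold pvLS
          rw [PySem.List.len_eq]
        by_cases hs : a < (pvStream graph r (t : Int)).length
        · rw [if_pos ⟨by omega, hs⟩, if_pos (by rw [hls]; omega),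
            PySem.List.pyGetD_natCast]
        · rw [if_neg (by rintro ⟨-, u⟩; omega), if_neg (by rw [hls]; omega)]

-- ---- B side: the row-major frequency pass builds one counter per column ----
def pvPref (graph : List (List Int)) (j : Int) (R : Nat) : List Int :=
  ((PySem.List.pyRange 0 (R : Int)).map (fun i => pvVal graph i j)).filter
    (fun v => decide (1 ≤ v ∧ v ≤ 100))

lemma counter_snoc (xs : List Int) (x : Int) :
    PySem.Dict.counter (xs ++ [x])
      = (PySem.Dict.counter xs).insert x ((PySem.Dict.counter xs).getD x 0 + 1) := by
  rw [← PySem.Dict.foldl_insert_getD_add_one_eq_counter (xs ++ [x]), List.foldl_append,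
    PySem.Dict.foldl_insert_getD_add_one_eq_counter]
  rfl

lemma pref_succ (graph : List (List Int)) (j : Int) (R : Nat) :
    pvPref graph j (R + 1)
      = pvPref graph j R ++
        (if 1 ≤ pvVal graph (R : Int) j ∧ pvVal graph (R : Int) j ≤ 100
          then [pvVal graph (R : Int) j] else []) := by
  unfold pvPref
  rw [show ((R + 1 : Nat) : Int) = (R : Int) + 1 by push_cast; ring,
    PySem.List.pyRange_one_succ_right (by positivity), List.map_append, List.filter_append]
  simp only [List.map_cons, List.map_nil, List.filter_cons, List.filter_nil]
  by_cases h : 1 ≤ pvVal graph (R : Int) j ∧ pvVal graph (R : Int) j ≤ 100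
  · rw [if_pos (by simpa using h), if_pos h]
  · rw [if_neg (by simpa using h), if_neg h]

lemma freqB_spec (graph : List (List Int)) (r c : Int) :
    pvFreqB graph r c
      = (PySem.List.pyRange 0 c).map (fun j => PySem.Dict.counter (pvFCol graph r j)) := by
  have hcol : ∀ j : Int, pvFCol graph r j = pvPref graph j r.toNat := by
    intro j; unfold pvFCol pvCol pvPref; rw [pyRange_toNat r]
  unfold pvFreqB
  rw [pyRange_toNat r]
  simp only [hcol]
  generalize r.toNat = R
  induction R with
  | zero =>
    rw [show ((0 : Nat) : Int) = 0 from rfl, PySem.List.pyRange_one_eq_nil le_rfl]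
    simp only [List.foldl_nil]
    apply List.map_congr_left
    intro j _
    unfold pvPref
    rw [show ((0 : Nat) : Int) = 0 from rfl, PySem.List.pyRange_one_eq_nil le_rfl]
    rfl
  | succ R ih =>
    have hsplit : PySem.List.pyRange 0 ((R + 1 : Nat) : Int) =
        PySem.List.pyRange 0 (R : Int) ++ [(R : Int)] := by
      push_cast
      exact PySem.List.pyRange_one_succ_right (by positivity)
    rw [hsplit, List.foldl_append, List.foldl_cons, List.foldl_nil, ih]
    have hslen : (List.map (fun j => PySem.Dict.counter (pvPref graph j R))
        (PySem.List.pyRange 0 c)).length = (c - 0).toNat := by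
      rw [List.length_map, PySem.List.length_pyRange_one]
    have hstep := foldl_setD_each
      (step := fun fr j =>
        if 1 ≤ PySem.List.pyGetD (PySem.List.pyGetD graph (R : Int) []) j 0 ∧
            PySem.List.pyGetD (PySem.List.pyGetD graph (R : Int) []) j 0 ≤ 100 then
          PySem.List.pySetD fr j
            ((PySem.List.pyGetD fr j PySem.Dict.empty).insert
              (PySem.List.pyGetD (PySem.List.pyGetD graph (R : Int) []) j 0)
              ((PySem.List.pyGetD fr j PySem.Dict.empty).getD
                (PySem.List.pyGetD (PySem.List.pyGetD graph (R : Int) []) j 0) 0 + 1))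
        else fr)
      (f := fun j d =>
        if 1 ≤ pvVal graph (R : Int) j ∧ pvVal graph (R : Int) j ≤ 100 then
          d.insert (pvVal graph (R : Int) j) (d.getD (pvVal graph (R : Int) j) 0 + 1)
        else d)
      (dflt := PySem.Dict.empty)
      (by
        intro t j
        show (if 1 ≤ pvVal graph (R : Int) j ∧ pvVal graph (R : Int) j ≤ 100 then
            PySem.List.pySetD t j
              ((PySem.List.pyGetD t j PySem.Dict.empty).insert (pvVal graph (R : Int) j)
                ((PySem.List.pyGetD t j PySem.Dict.empty).getD (pvVal graph (R : Int) j) 0 + 1))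
          else t)
          = PySem.List.pySetD t j
              (if 1 ≤ pvVal graph (R : Int) j ∧ pvVal graph (R : Int) j ≤ 100 then
                (PySem.List.pyGetD t j PySem.Dict.empty).insert (pvVal graph (R : Int) j)
                  ((PySem.List.pyGetD t j PySem.Dict.empty).getD (pvVal graph (R : Int) j) 0 + 1)
              else PySem.List.pyGetD t j PySem.Dict.empty)
        split_ifs with h
        · rfl
        · rw [pySetD_pyGetD_self])
      c.toNat
      (List.map (fun j => PySem.Dict.counter (pvPref graph j R)) (PySem.List.pyRange 0 c))
      (by rw [hslen]; omega)
    obtain ⟨hl2, hg2⟩ := hstep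
    rw [← pyRange_toNat c] at hl2 hg2
    apply List.ext_getElem
    · rw [hl2, hslen, List.length_map, PySem.List.length_pyRange_one]
    · intro a h1 h2
      have hac : a < c.toNat := by rw [hl2, hslen] at h1; omega
      rw [getElem_eq_getD _ a PySem.Dict.empty h1, hg2 a (by rw [hslen]; omega), if_pos hac]
      have hsa : (List.map (fun j => PySem.Dict.counter (pvPref graph j R))
          (PySem.List.pyRange 0 c)).getD a PySem.Dict.empty
          = PySem.Dict.counter (pvPref graph (a : Int) R) := by
        rw [← getElem_eq_getD _ a PySem.Dict.empty (by rw [hslen]; omega)]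
        simp only [List.getElem_map, PySem.List.getElem_pyRange_one, zero_add]
      rw [hsa]
      have hrhs : (List.map (fun j => PySem.Dict.counter (pvPref graph j (R + 1)))
          (PySem.List.pyRange 0 c))[a]'h2
          = PySem.Dict.counter (pvPref graph (a : Int) (R + 1)) := by
        simp only [List.getElem_map, PySem.List.getElem_pyRange_one, zero_add]
      rw [hrhs, pref_succ]
      beta_reduce
      by_cases h : 1 ≤ pvVal graph (R : Int) (a : Int) ∧ pvVal graph (R : Int) (a : Int) ≤ 100
      · rw [if_pos h, if_pos h, counter_snoc]
      · rw [if_neg h, if_neg h, List.append_nil]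

-- ---- B side: buckets + frequency enumeration = the sorted pair stream ----
def pvBk (graph : List (List Int)) (r j cnt : Int) : List Int :=
  (PySem.List.pyRange 1 101).filter (fun v =>
    (pvFCol graph r j).contains v && ((((pvFCol graph r j).count v : Int)) == cnt))

def pvL (graph : List (List Int)) (r j : Int) : List (Int × Int) :=
  (PySem.List.pyRange 1 (r + 1)).flatMap (fun cnt =>
    (pvBk graph r j cnt).map (fun v => (cnt, v)))

lemma count_mem_bounds (graph : List (List Int)) (r j : Int) (v : Int)
    (hv : v ∈ pvFCol graph r j) :
    1 ≤ (((pvFCol graph r j).count v : Nat) : Int) ∧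
      (((pvFCol graph r j).count v : Nat) : Int) < r + 1 := by
  have h1 : 0 < (pvFCol graph r j).count v := List.count_pos_iff.mpr hv
  have h2 : (pvFCol graph r j).count v ≤ (pvFCol graph r j).length := List.count_le_length
  have h3 : (pvFCol graph r j).length ≤ (pvCol graph r j).length := List.length_filter_le _ _
  have h4 : (pvCol graph r j).length = (r - 0).toNat := by
    unfold pvCol; rw [List.length_map, PySem.List.length_pyRange_one]
  omega

lemma mem_fcol_bounds (graph : List (List Int)) (r j : Int) (v : Int)
    (hv : v ∈ pvFCol graph r j) : 1 ≤ v ∧ v ≤ 100 := by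
  unfold pvFCol at hv
  have := (List.mem_filter.mp hv).2
  simpa using this

lemma L_pairwise_lt (graph : List (List Int)) (r j : Int) :
    (pvL graph r j).Pairwise (fun a b => (toLex a : Lex (Int × Int)) < toLex b) := by
  unfold pvL
  rw [List.pairwise_flatMap]
  constructor
  · intro cnt _
    apply List.Pairwise.map
    · intro v w hvw
      exact Prod.Lex.lt_iff.mpr (Or.inr ⟨rfl, hvw⟩)
    · exact (PySem.List.pairwise_lt_pyRange_one 1 101).filter _
  · apply (PySem.List.pairwise_lt_pyRange_one 1 (r + 1)).imp
    intro c1 c2 hlt x hx y hy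
    obtain ⟨v, -, rfl⟩ := List.mem_map.mp hx
    obtain ⟨w, -, rfl⟩ := List.mem_map.mp hy
    exact Prod.Lex.lt_iff.mpr (Or.inl hlt)

lemma L_perm (graph : List (List Int)) (r j : Int) :
    (pvL graph r j).Perm
      ((PySem.Set.ofList (pvFCol graph r j)).map
        (fun v => (((pvFCol graph r j).count v : Int), v))) := by
  have hndL : (pvL graph r j).Nodup :=
    (L_pairwise_lt graph r j).imp (fun h => by
      intro he
      rw [he] at h
      exact lt_irrefl _ h)
  have hinj : Function.Injective (fun v : Int => (((pvFCol graph r j).count v : Int), v)) :=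
    fun a b h => congrArg Prod.snd h
  have hndR := (PySem.Set.nodup_ofList (pvFCol graph r j)).map hinj
  apply (List.perm_ext_iff_of_nodup hndL hndR).mpr
  intro p
  simp only [pvL, pvBk, List.mem_flatMap, List.mem_map, List.mem_filter,
    PySem.List.mem_pyRange_one, PySem.Set.mem_ofList, Bool.and_eq_true, beq_iff_eq,
    List.contains_iff_mem]
  constructor
  · rintro ⟨cnt, ⟨hc1, hc2⟩, v, ⟨⟨hv1, hv2⟩, hmem, hcnt⟩, rfl⟩
    exact ⟨v, hmem, by rw [hcnt]⟩
  · rintro ⟨v, hmem, rfl⟩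
    obtain ⟨hb1, hb2⟩ := count_mem_bounds graph r j v hmem
    obtain ⟨hv1, hv2⟩ := mem_fcol_bounds graph r j v hmem
    exact ⟨((pvFCol graph r j).count v : Int), ⟨hb1, hb2⟩, v, ⟨⟨hv1, by omega⟩, hmem, rfl⟩, rfl⟩

lemma L_eq_pairs (graph : List (List Int)) (r j : Int) :
    pvL graph r j = pvPairs graph r j := by
  unfold pvPairs
  exact (sorted2_eq_of_pairwise_perm (L_perm graph r j)
    ((L_pairwise_lt graph r j).imp le_of_lt)).symm

lemma streamB_eq (graph : List (List Int)) (r j : Int) :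
    pvStreamB r (PySem.Dict.counter (pvFCol graph r j)) = pvStream graph r j := by
  unfold pvStreamB
  simp only []
  have hbk : ∀ cnt : Int,
      ((PySem.List.pyRange 1 101).foldl (fun b v =>
          if (PySem.Dict.counter (pvFCol graph r j)).contains v then
            b.modify ((PySem.Dict.counter (pvFCol graph r j)).getD v 0) [] (fun l => l ++ [v])
          else b)
        (PySem.Dict.empty : PySem.Dict Int (List Int))).getD cnt []
      = pvBk graph r j cnt := by
    intro cnt
    rw [PySem.List.foldl_if_eq_foldl_filter]
    rw [show (List.filter (fun v => (PySem.Dict.counter (pvFCol graph r j)).contains v)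
          (PySem.List.pyRange 1 101)).foldl (fun b v =>
            b.modify ((PySem.Dict.counter (pvFCol graph r j)).getD v 0) [] (fun l => l ++ [v]))
          (PySem.Dict.empty : PySem.Dict Int (List Int))
        = ((List.filter (fun v => (PySem.Dict.counter (pvFCol graph r j)).contains v)
            (PySem.List.pyRange 1 101)).map (fun v =>
              ((PySem.Dict.counter (pvFCol graph r j)).getD v 0, v))).foldl
            (fun b p => b.modify p.1 [] (fun l => l ++ [p.2]))
            (PySem.Dict.empty : PySem.Dict Int (List Int)) from
      (List.foldl_map
        (f := fun v => ((PySem.Dict.counter (pvFCol graph r j)).getD v 0, v))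
        (g := fun (b : PySem.Dict Int (List Int)) (p : Int × Int) =>
          b.modify p.1 [] (fun l => l ++ [p.2]))).symm]
    rw [PySem.Dict.getD_foldl_modify_append, List.filter_map, List.map_map]
    have hmapid : ((fun x : Int × Int => x.2) ∘
        (fun v : Int => ((PySem.Dict.counter (pvFCol graph r j)).getD v 0, v))) = id := rfl
    rw [hmapid, List.map_id, List.filter_filter]
    unfold pvBk
    apply List.filter_congr
    intro v _
    simp [Function.comp, PySem.Dict.contains_counter, PySem.Dict.getD_counter, Bool.and_comm]
  have hfun : (fun (s : List Int) (cnt : Int) =>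
      ((PySem.List.pyRange 1 101).foldl (fun b v =>
          if (PySem.Dict.counter (pvFCol graph r j)).contains v then
            b.modify ((PySem.Dict.counter (pvFCol graph r j)).getD v 0) [] (fun l => l ++ [v])
          else b)
        (PySem.Dict.empty : PySem.Dict Int (List Int))).getD cnt [] |>.foldl
          (fun s v => s ++ [v] ++ [cnt]) s)
      = (fun (s : List Int) (cnt : Int) =>
          s ++ (pvBk graph r j cnt).flatMap (fun v => [v, cnt])) := by
    funext s cnt
    rw [hbk cnt]
    have hb : (fun (s : List Int) (v : Int) => s ++ [v] ++ [cnt])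
        = (fun (s : List Int) (v : Int) => s ++ [v, cnt]) := by
      funext s v
      rw [List.append_assoc]
      rfl
    rw [hb, PySem.List.foldl_append_eq_flatMap]
  rw [hfun, PySem.List.foldl_append_eq_flatMap, List.nil_append]
  have hS : (PySem.List.pyRange 1 (r + 1)).flatMap
        (fun cnt => (pvBk graph r j cnt).flatMap (fun v => [v, cnt]))
      = (pvL graph r j).flatMap (fun p => [p.2, p.1]) := by
    unfold pvL
    rw [List.flatMap_assoc]
    congr 1
    funext cnt
    rw [List.flatMap_map]
  rw [hS, L_eq_pairs]
  rfl

lemma alt_eq_grid (graph : List (List Int)) (r c : Int) :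
    c_function_alt graph r c = pvGridOf graph r c (pvHB graph r c) := by
  unfold c_function_alt
  simp only []
  rw [freqB_spec,
    PySem.List.foldl_prod_mk
      (f := fun (acc : List (List Int)) f => acc ++ [pvStreamB r f])
      (g := fun (acc : Int) f => max acc (PySem.List.len (pvStreamB r f))),
    PySem.List.foldl_append_singleton_eq_map, List.nil_append, List.map_map]
  have hcols : ((fun f => pvStreamB r f) ∘ fun j => PySem.Dict.counter (pvFCol graph r j))
      = fun j => pvStream graph r j := by
    funext j
    simp only [Function.comp]
    exact streamB_eq graph r j
  rw [hcols]
  have hh : ((PySem.List.pyRange 0 c).map (fun j => PySem.Dict.counter (pvFCol graph r j))).foldl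
        (fun acc f => max acc (PySem.List.len (pvStreamB r f))) 0
      = pvHB graph r c := by
    rw [List.foldl_map
      (f := fun j => PySem.Dict.counter (pvFCol graph r j))
      (g := fun acc f => max acc (PySem.List.len (pvStreamB r f)))]
    unfold pvHB pvLens
    rw [List.foldl_map (f := fun j => pvLS graph r j) (g := fun (a x : Int) => max a x)]
    apply PySem.List.foldl_congr_mem
    intro acc x _
    rw [streamB_eq graph r x]
    rfl
  rw [hh]
  unfold pvGridOf
  apply List.map_congr_left
  intro k _
  rw [List.map_map]
  rfl

-- ===== VERDICT (by name: the statement is the Claim_ definition above) =====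
theorem c_function_spec : Claim_equal_c_function := by
  intro graph r c _ hpre
  unfold Spec_c_function
  rw [a_eq_grid graph r c hpre, alt_eq_grid graph r c]
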